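-- pv_equiv track=rewrite | github.com/mnemonic-no/provreq | provreq/tools/libs/data.py | check_promise_description
-- ===== SOURCE A (Python) =====
-- from typing import Dict, List, Set, Text, TextIO, Tuple
--
-- def check_promise_description(
--     agents: Dict, promise_description: Set[Text]
-- ) -> Set[Text]:
--     """
--     Get list of promise_description used in agents
--     that are not defined in condition vocabulary
--     """
--
--     missing = set()
--     condition_keys = ["requires", "provides"]
--     for _, agent in agents.items():
--         for key in condition_keys:
--             missing.update(
--                 [cond for cond in agent[key] if cond not in promise_description]
--             )
--     return missing
-- ===== SOURCE B (Python) =====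
-- def check_promise_description(agents, promise_description):
--     """
--     Divide-and-conquer: recursively split the agent list in half, resolve
--     each single agent's missing conditions at the leaf, union the halves.
--     """
--     items = list(agents.values())
--
--     def leaf(agent):
--         return (set(agent["requires"]) | set(agent["provides"])) - promise_description
--
--     def go(lo, hi):
--         if hi - lo == 0:
--             return set()
--         if hi - lo == 1:
--             return leaf(items[lo])
--         mid = (lo + hi) // 2
--         return go(lo, mid) | go(mid, hi)
--
--     return go(0, len(items))
-- ===== Notes on version B (the rewrite author's own statement) =====
-- stated objective: alternative
-- what changed: B replaces A's sequential loop-with-accumulator (iterating agents and the two condition keys, filtering each condition against the vocabulary inline) by a divide-and-conquer recursion: it splits the agent list in half, computes each single agent's missing set at a leaf via set union and one set difference, and merges subresults with set union.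
import Mathlib
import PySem

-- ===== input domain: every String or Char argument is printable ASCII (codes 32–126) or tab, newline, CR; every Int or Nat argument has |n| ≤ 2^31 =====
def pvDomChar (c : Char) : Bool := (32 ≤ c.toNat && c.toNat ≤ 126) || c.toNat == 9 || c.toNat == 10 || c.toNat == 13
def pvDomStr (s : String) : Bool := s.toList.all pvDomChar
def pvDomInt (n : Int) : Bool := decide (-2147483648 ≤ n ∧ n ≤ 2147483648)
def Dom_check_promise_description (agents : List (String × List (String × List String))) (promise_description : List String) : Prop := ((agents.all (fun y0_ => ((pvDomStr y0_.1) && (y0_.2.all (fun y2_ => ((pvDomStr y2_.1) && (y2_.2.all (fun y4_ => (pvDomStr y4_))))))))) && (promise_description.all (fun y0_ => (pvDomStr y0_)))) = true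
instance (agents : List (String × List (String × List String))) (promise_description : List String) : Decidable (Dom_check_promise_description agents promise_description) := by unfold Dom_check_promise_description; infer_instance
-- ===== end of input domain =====

-- B replaces A's accumulator loop by a divide-and-conquer recursion: split the agent list in half, resolve each single agent's missing conditions at a leaf, and union the halves (objective: alternative; return value only — no mutation in either version).


-- ===== PORT A =====
-- agent[key] is ported with Dict.getD; Pre_ excludes exactly the inputs where Python raises KeyError.
def check_promise_description (agents : List (String × List (String × List String))) (promise_description : List String) : List String :=
  agents.foldl
    (fun missing agentPair =>
      (["requires", "provides"] : List String).foldl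
        (fun m key =>
          PySem.Set.update m
            ((PySem.Dict.getD (PySem.Dict.mk agentPair.2) key []).filter
              (fun cond => !(PySem.Set.contains promise_description cond))))
        missing)
    PySem.Set.empty

-- ===== PORT B =====
-- leaf(agent) = (set(agent["requires"]) | set(agent["provides"])) - promise_description
def pvLeaf (promise_description : List String) (agent : List (String × List String)) : PySem.Set String :=
  PySem.Set.diff
    (PySem.Set.union (PySem.Set.ofList (PySem.Dict.getD (PySem.Dict.mk agent) "requires" []))
      (PySem.Set.ofList (PySem.Dict.getD (PySem.Dict.mk agent) "provides" [])))
    promise_description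

-- go(lo, hi) over items: Source B's index recursion ported as the same halving recursion on the sublist items[lo:hi]
def pvGo (promise_description : List String) (items : List (List (String × List String))) : PySem.Set String :=
  match items with
  | [] => PySem.Set.empty
  | [a] => pvLeaf promise_description a
  | x :: y :: rest =>
      let l := x :: y :: rest
      PySem.Set.union (pvGo promise_description (l.take (l.length / 2)))
        (pvGo promise_description (l.drop (l.length / 2)))
termination_by items.length
decreasing_by
  all_goals (simp [List.length_take, List.length_drop]; omega)

def check_promise_description_alt (agents : List (String × List (String × List String))) (promise_description : List String) : List String :=
  pvGo promise_description (agents.map (fun a => a.2))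

-- ===== PRECONDITION & SPEC =====
-- Pre_ excludes exactly the inputs where Python A raises KeyError: an agent dict lacking a "requires" or "provides" key.
def Pre_check_promise_description (agents : List (String × List (String × List String))) (promise_description : List String) : Prop :=
  agents.all (fun a => PySem.Dict.contains (PySem.Dict.mk a.2) "requires" && PySem.Dict.contains (PySem.Dict.mk a.2) "provides") = true
instance (agents : List (String × List (String × List String))) (promise_description : List String) : Decidable (Pre_check_promise_description agents promise_description) := by unfold Pre_check_promise_description; infer_instance
def pvWitness_check_promise_description : (List (String × List (String × List String))) × List String :=
  ([("a1", [("requires", ["x", "y"]), ("provides", ["z"])])], ["y"])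

def Spec_check_promise_description (agents : List (String × List (String × List String))) (promise_description : List String) (out : List String) : Prop := out = check_promise_description_alt agents promise_description
instance (agents : List (String × List (String × List String))) (promise_description : List String) (out : List String) : Decidable (Spec_check_promise_description agents promise_description out) := by unfold Spec_check_promise_description; infer_instance

-- ===== CLAIM (what is proved, stated in full; the proofs are below) =====
def Claim_equal_check_promise_description : Prop := ∀ (agents : List (String × List (String × List String))) (promise_description : List String), Dom_check_promise_description agents promise_description → Pre_check_promise_description agents promise_description → Spec_check_promise_description agents promise_description (check_promise_description agents promise_description)

-- ===== LEMMAS AND PROOFS =====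

-- A's per-agent step (the two-key inner loop unfolded)
def pvStep (promise_description : List String) (m : PySem.Set String) (agent : List (String × List String)) : PySem.Set String :=
  PySem.Set.update
    (PySem.Set.update m
      ((PySem.Dict.getD (PySem.Dict.mk agent) "requires" []).filter
        (fun cond => !(PySem.Set.contains promise_description cond))))
    ((PySem.Dict.getD (PySem.Dict.mk agent) "provides" []).filter
      (fun cond => !(PySem.Set.contains promise_description cond)))

theorem pv_union_add (S T : PySem.Set String) (h : String) :
    PySem.Set.union S (PySem.Set.add T h) = PySem.Set.add (PySem.Set.union S T) h := by
  by_cases hm : h ∈ T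
  · have hm2 : h ∈ PySem.Set.union S T := (PySem.Set.mem_update _ _ _).mpr (Or.inr hm)
    rw [PySem.Set.add_of_mem hm, PySem.Set.add_of_mem hm2]
  · rw [PySem.Set.add_of_not_mem hm]
    show PySem.Set.update S (T ++ [h]) = _
    rw [PySem.Set.update_append, PySem.Set.update_cons]
    rfl

theorem pv_union_update (l : List String) (S T : PySem.Set String) :
    PySem.Set.union S (PySem.Set.update T l) = PySem.Set.update (PySem.Set.union S T) l := by
  induction l generalizing T with
  | nil => rfl
  | cons a l ih =>
      rw [PySem.Set.update_cons, PySem.Set.update_cons, ih, pv_union_add]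

theorem pv_union_empty (S : PySem.Set String) : PySem.Set.union S PySem.Set.empty = S := rfl

-- filtering commutes with Set.add
theorem pv_filter_add (T : PySem.Set String) (a : String) (p : String → Bool) :
    (PySem.Set.add T a).filter p = if p a then PySem.Set.add (T.filter p) a else T.filter p := by
  unfold PySem.Set.add PySem.Set.contains
  by_cases h : a ∈ T
  · by_cases hp : p a
    · have ha : a ∈ T.filter p := List.mem_filter.mpr ⟨h, hp⟩
      simp [h, hp, ha]
    · simp [h, hp]
  · by_cases hp : p a
    · have ha : a ∉ T.filter p := fun hm => h (List.mem_filter.mp hm).1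
      simp [h, hp, ha]
    · simp [h, hp]

-- filtering commutes with Set.update, filtering the added list
theorem pv_filter_update (l : List String) (T : PySem.Set String) (p : String → Bool) :
    (PySem.Set.update T l).filter p = PySem.Set.update (T.filter p) (l.filter p) := by
  induction l generalizing T with
  | nil => rfl
  | cons a l ih =>
      unfold PySem.Set.update at *
      simp only [List.foldl_cons]
      rw [ih]
      by_cases hp : p a
      · simp [hp, pv_filter_add]
      · simp [hp, pv_filter_add]

-- set.update with an already-deduplicated list = update with the raw list
theorem pv_update_ofList (l : List String) (S : PySem.Set String) :
    PySem.Set.update S (PySem.Set.ofList l) = PySem.Set.update S l := by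
  induction l using List.reverseRecOn generalizing S with
  | nil => rfl
  | append_singleton xs x ih =>
      rw [PySem.Set.ofList_append_singleton, PySem.Set.update_append S xs [x],
        PySem.Set.update_cons]
      by_cases hx : x ∈ PySem.Set.ofList xs
      · have hx' : x ∈ xs := (PySem.Set.mem_ofList _ _).mp hx
        have hx2 : x ∈ PySem.Set.update S xs := (PySem.Set.mem_update _ _ _).mpr (Or.inr hx')
        rw [PySem.Set.add_of_mem hx, ih, PySem.Set.add_of_mem hx2]
        rfl
      · rw [PySem.Set.add_of_not_mem hx, PySem.Set.update_append S _ [x],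
          PySem.Set.update_cons, ih]

-- filter commutes with dedup
theorem pv_filter_ofList (l : List String) (p : String → Bool) :
    (PySem.Set.ofList l).filter p = PySem.Set.ofList (l.filter p) := by
  induction l using List.reverseRecOn with
  | nil => rfl
  | append_singleton xs x ih =>
      rw [PySem.Set.ofList_append_singleton, pv_filter_add, List.filter_append]
      by_cases hp : p x
      · simp [hp, ih, PySem.Set.ofList_append_singleton]
      · simp [hp, ih]

-- a leaf equals A's step applied to the empty set
theorem pv_leaf_eq_step (p : List String) (a : List (String × List String)) :
    pvLeaf p a = pvStep p PySem.Set.empty a := by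
  unfold pvLeaf pvStep
  show ((PySem.Set.update (PySem.Set.update PySem.Set.empty _)
      (PySem.Set.ofList _)).filter _) = _
  rw [pv_filter_update, pv_filter_update, pv_filter_ofList, pv_update_ofList]
  rfl

-- every pvGo result is duplicate-free (it is built by Set operations)
theorem pv_go_nodup (p : List String) :
    ∀ (n : Nat) (items : List (List (String × List String))),
      items.length ≤ n → (pvGo p items).Nodup := by
  intro n
  induction n with
  | zero =>
      intro items h
      have : items = [] := List.length_eq_zero_iff.mp (Nat.le_zero.mp h)
      subst this; rw [pvGo]; exact List.nodup_nil
  | succ n ih =>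
      intro items h
      match items with
      | [] => rw [pvGo]; exact List.nodup_nil
      | [a] =>
          rw [pvGo]
          exact PySem.Set.nodup_diff _ _ (PySem.Set.nodup_union _ _ (PySem.Set.nodup_ofList _))
      | x :: y :: rest =>
          rw [pvGo]
          have h1 : ((x :: y :: rest).take ((x :: y :: rest).length / 2)).length ≤ n := by
            have hlen : rest.length + 2 ≤ n + 1 := by simpa using h
            simp [List.length_take]; omega
          exact PySem.Set.nodup_union _ _ (ih _ h1)

-- divide-and-conquer invariant: unioning S with go(items) = A's fold over items from S
theorem pv_go_eq_foldl (p : List String) :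
    ∀ (n : Nat) (items : List (List (String × List String))) (S : PySem.Set String),
      items.length ≤ n →
      PySem.Set.union S (pvGo p items) = items.foldl (pvStep p) S := by
  intro n
  induction n with
  | zero =>
      intro items S h
      have : items = [] := List.length_eq_zero_iff.mp (Nat.le_zero.mp h)
      subst this; rw [pvGo]; rfl
  | succ n ih =>
      intro items S h
      match items with
      | [] => rw [pvGo]; rfl
      | [a] =>
          rw [pvGo]
          show PySem.Set.union S (pvLeaf p a) = pvStep p S a
          rw [pv_leaf_eq_step]
          unfold pvStep
          rw [pv_union_update, pv_union_update, pv_union_empty]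
      | x :: y :: rest =>
          rw [pvGo]
          have hlen : rest.length + 2 ≤ n + 1 := by simpa using h
          have h1 : ((x :: y :: rest).take ((x :: y :: rest).length / 2)).length ≤ n := by
            simp [List.length_take]; omega
          have h2 : ((x :: y :: rest).drop ((x :: y :: rest).length / 2)).length ≤ n := by
            simp [List.length_drop]; omega
          show PySem.Set.union S (PySem.Set.update _ _) = _
          rw [pv_union_update]
          show PySem.Set.union (PySem.Set.union S _) _ = _
          rw [ih _ S h1, ih _ _ h2, ← List.foldl_append, List.take_append_drop]

-- ===== VERDICT (by name: the statement is the Claim_ definition above) =====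
theorem check_promise_description_spec : Claim_equal_check_promise_description := by
  intro agents promise_description _ _
  unfold Spec_check_promise_description check_promise_description check_promise_description_alt
  have h := pv_go_eq_foldl promise_description (agents.map (fun a => a.2)).length
      (agents.map (fun a => a.2)) PySem.Set.empty le_rfl
  have hn : (pvGo promise_description (agents.map (fun a => a.2))).Nodup :=
    pv_go_nodup promise_description _ _ le_rfl
  have h0 : PySem.Set.union PySem.Set.empty (pvGo promise_description (agents.map (fun a => a.2)))
      = pvGo promise_description (agents.map (fun a => a.2)) :=
    PySem.Set.ofList_eq_self_of_nodup _ hn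
  rw [h0, List.foldl_map] at h
  exact h.symm
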